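-- pv_equiv track=rewrite | github.com/FMLBeast/crypto-puzzle-hunter | analyzers/cipher-analyzer.py | solve_substitution_cipher
-- ===== SOURCE A (Python) =====
-- import string
-- from typing import Dict, List, Any, Optional, Tuple, Union
-- from collections import Counter
--
-- def solve_substitution_cipher(text: str) -> Dict[str, str]:
--     """
--     Attempt to solve a simple substitution cipher using frequency analysis.
--
--     Args:
--         text: Ciphertext
--
--     Returns:
--         Mapping from ciphertext to plaintext letters
--     """
--     # English letter frequency (from most to least common)
--     english_freq_order = 'etaoinsrhdlucmfywgpbvkjxqz'
--
--     # Count the frequency of each letter in the text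
--     freq = Counter(text.lower())
--
--     # Skip if we don't have enough letters
--     if len(freq) < 10:
--         return {}
--
--     # Create a mapping based on frequency
--     cipher_freq_order = ''.join(letter for letter, _ in freq.most_common() if letter.isalpha())
--
--     # Create the initial mapping
--     mapping = {}
--     for i, cipher_char in enumerate(cipher_freq_order):
--         if i < len(english_freq_order):
--             mapping[cipher_char] = english_freq_order[i]
--
--     # Fill in any missing letters
--     for cipher_char in string.ascii_lowercase:
--         if cipher_char not in mapping:
--             for plain_char in string.ascii_lowercase:
--                 if plain_char not in mapping.values():
--                     mapping[cipher_char] = plain_char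
--                     break
--
--     return mapping
-- ===== SOURCE B (Python) =====
-- import string
-- from collections import Counter
--
--
-- def solve_substitution_cipher(text: str):
--     """Frequency-analysis substitution-cipher mapping, built with zip over
--     precomputed leftover letters instead of nested re-scanning."""
--     english_freq_order = 'etaoinsrhdlucmfywgpbvkjxqz'
--     freq = Counter(text.lower())
--     if len(freq) < 10:
--         return {}
--     cipher_letters = [l for l, _ in freq.most_common() if l.isalpha()]
--     mapping = dict(zip(cipher_letters, english_freq_order))
--     used = set(mapping.values())
--     remaining = [c for c in string.ascii_lowercase if c not in used]
--     missing = [c for c in string.ascii_lowercase if c not in mapping]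
--     mapping.update(zip(missing, remaining))
--     return mapping
-- ===== Notes on version B (the rewrite author's own statement) =====
-- stated objective: simpler
-- what changed: B builds the initial mapping as dict(zip(cipher_letters, english_freq_order)) instead of an enumerate loop with an index guard, and replaces A's fill-in phase (which for every unmapped letter rescans mapping.values() from scratch inside a nested loop) by one precomputed pass: the leftover plaintext letters and the still-unmapped cipher letters are each computed once and zipped together.
import Mathlib
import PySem

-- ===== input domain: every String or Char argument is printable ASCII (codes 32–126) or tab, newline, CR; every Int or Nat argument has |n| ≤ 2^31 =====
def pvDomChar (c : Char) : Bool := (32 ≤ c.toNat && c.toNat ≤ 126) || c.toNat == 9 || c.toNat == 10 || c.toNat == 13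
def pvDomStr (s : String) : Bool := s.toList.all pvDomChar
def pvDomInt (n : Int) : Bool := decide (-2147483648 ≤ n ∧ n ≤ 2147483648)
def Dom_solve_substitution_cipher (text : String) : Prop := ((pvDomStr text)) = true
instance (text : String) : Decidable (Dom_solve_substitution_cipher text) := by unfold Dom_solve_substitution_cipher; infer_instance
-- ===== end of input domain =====

-- B replaces A's nested fill-in rescans (and the enumerate+index-guard mapping loop) by
-- zipping precomputed missing/leftover letter lists; objective: simpler, same cost.


-- ===== PORT A =====
-- string.ascii_lowercase
def asciiLower : List Char :=
  ['a','b','c','d','e','f','g','h','i','j','k','l','m','n','o','p','q','r','s','t','u','v','w','x','y','z']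
-- 'etaoinsrhdlucmfywgpbvkjxqz'
def englishFreqOrder : List Char :=
  ['e','t','a','o','i','n','s','r','h','d','l','u','c','m','f','y','w','g','p','b','v','k','j','x','q','z']

def solve_substitution_cipher (text : String) : List (String × String) :=
  let freq := PySem.Dict.counter (PySem.Str.lower text).toList
  if freq.size < 10 then []
  else
    -- ''.join(letter for letter, _ in freq.most_common() if letter.isalpha())
    let cipherFreqOrder : List Char :=
      ((PySem.List.sorted freq.items (fun p => p.2) true).filter
        (fun p => PySem.Chars.isalpha p.1)).map (fun p => p.1)
    -- for i, cipher_char in enumerate(...): if i < len(english_freq_order): mapping[c] = english[i]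
    let mapping := (PySem.List.enumerate cipherFreqOrder 0).foldl
      (fun m p => if p.1 < (englishFreqOrder.length : Int)
                  then m.insert p.2 (PySem.List.pyGetD englishFreqOrder p.1 'a')
                  else m)
      PySem.Dict.empty
    -- fill in any missing letters (inner for/break = find? of the first unused plain letter)
    let mapping2 := asciiLower.foldl
      (fun m c =>
        if m.contains c then m
        else
          match asciiLower.find? (fun p => !(m.values.contains p)) with
          | some p => m.insert c p
          | none => m)
      mapping
    mapping2.items.map (fun kv => (String.ofList [kv.1], String.ofList [kv.2]))

-- ===== PORT B =====
def solve_substitution_cipher_alt (text : String) : List (String × String) :=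
  let freq := PySem.Dict.counter (PySem.Str.lower text).toList
  if freq.size < 10 then []
  else
    let cipherLetters : List Char :=
      ((PySem.List.sorted freq.items (fun p => p.2) true).filter
        (fun p => PySem.Chars.isalpha p.1)).map (fun p => p.1)
    -- mapping = dict(zip(cipher_letters, english_freq_order))
    let mapping := (cipherLetters.zip englishFreqOrder).foldl
      (fun m kv => m.insert kv.1 kv.2) PySem.Dict.empty
    let used : PySem.Set Char := PySem.Set.ofList mapping.values
    let remaining := asciiLower.filter (fun c => !(PySem.Set.contains used c))
    let missing := asciiLower.filter (fun c => !(mapping.contains c))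
    -- mapping.update(zip(missing, remaining))
    let mapping2 := (missing.zip remaining).foldl (fun m kv => m.insert kv.1 kv.2) mapping
    mapping2.items.map (fun kv => (String.ofList [kv.1], String.ofList [kv.2]))

-- ===== PRECONDITION & SPEC =====
def Spec_solve_substitution_cipher (text : String) (out : List (String × String)) : Prop := out = solve_substitution_cipher_alt text
instance (text : String) (out : List (String × String)) : Decidable (Spec_solve_substitution_cipher text out) := by unfold Spec_solve_substitution_cipher; infer_instance

-- ===== CLAIM (what is proved, stated in full; the proofs are below) =====
def Claim_equal_solve_substitution_cipher : Prop := ∀ (text : String), Dom_solve_substitution_cipher text → Spec_solve_substitution_cipher text (solve_substitution_cipher text)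

-- ===== LEMMAS AND PROOFS =====

-- a character of ASCII code 97..122 is a member of the literal list asciiLower
theorem mem_asciiLower_of_range (c : Char) (h1 : 97 ≤ c.toNat) (h2 : c.toNat ≤ 122) :
    c ∈ asciiLower := by
  have hc : Char.ofNat c.toNat = c := Char.ofNat_toNat c
  rw [← hc]
  set n := c.toNat with hn
  clear_value n
  interval_cases n <;> decide

theorem lowerChar_mem_asciiLower (d : Char)
    (h : PySem.Chars.isalpha (PySem.Chars.lowerChar d) = true) :
    PySem.Chars.lowerChar d ∈ asciiLower := by
  have hup : PySem.Chars.isupper (PySem.Chars.lowerChar d) = false := by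
    simp only [PySem.Chars.lowerChar, PySem.Chars.isupper]
    split
    · rename_i hu
      simp only [Bool.and_eq_true, decide_eq_true_eq] at hu
      have h65 : 65 ≤ d.toNat := by simpa [Char.le_def, UInt32.le_iff_toNat_le] using hu.1
      have h90 : d.toNat ≤ 90 := by simpa [Char.le_def, UInt32.le_iff_toNat_le] using hu.2
      have hv : (Char.ofNat (d.toNat + 32)).toNat = d.toNat + 32 := by
        rw [Char.toNat_ofNat]
        have : (d.toNat + 32).isValidChar := Or.inl (by omega)
        simp [this]
      simp only [Bool.and_eq_false_iff, decide_eq_false_iff_not]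
      right
      intro hle
      have : 90 < d.toNat + 32 := by omega
      have := (by simpa [Char.le_def, UInt32.le_iff_toNat_le, hv] using hle : (Char.ofNat (d.toNat+32)).toNat ≤ 90)
      omega
    · rename_i hu
      simpa using hu
  have hlo : PySem.Chars.islower (PySem.Chars.lowerChar d) = true := by
    simp only [PySem.Chars.isalpha, Bool.or_eq_true, hup] at h
    simpa using h
  simp only [PySem.Chars.islower, Bool.and_eq_true, decide_eq_true_eq] at hlo
  apply mem_asciiLower_of_range
  · simpa [Char.le_def, UInt32.le_iff_toNat_le] using hlo.1
  · simpa [Char.le_def, UInt32.le_iff_toNat_le] using hlo.2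


-- A's enumerate/guard loop equals B's zip loop
theorem enumerate_guard_eq_zip (L : List Char) (s : Nat) (m : PySem.Dict Char Char) :
    (PySem.List.enumerate L (s : Int)).foldl
      (fun m p => if p.1 < (englishFreqOrder.length : Int)
                  then m.insert p.2 (PySem.List.pyGetD englishFreqOrder p.1 'a')
                  else m) m
    = (L.zip (englishFreqOrder.drop s)).foldl (fun m kv => m.insert kv.1 kv.2) m := by
  induction L generalizing s m with
  | nil => simp [PySem.List.enumerate]
  | cons x xs ih =>
    rw [PySem.List.enumerate_cons]
    by_cases hs : s < englishFreqOrder.length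
    · have hdrop := List.drop_eq_getElem_cons hs
      have hcast : ((s : Int) + 1) = ((s + 1 : Nat) : Int) := by push_cast; ring
      simp only [List.foldl_cons, hdrop, List.zip_cons_cons]
      rw [hcast, ih]
      have hguard : ((s : Int) < (englishFreqOrder.length : Int)) := by exact_mod_cast hs
      rw [if_pos hguard, PySem.List.pyGetD_natCast, List.getD_eq_getElem _ _ hs]
    · have hdrop : englishFreqOrder.drop s = [] := List.drop_eq_nil_of_le (by omega)
      have hdrop1 : englishFreqOrder.drop (s+1) = [] := List.drop_eq_nil_of_le (by omega)
      have hcast : ((s : Int) + 1) = ((s + 1 : Nat) : Int) := by push_cast; ring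
      simp only [List.foldl_cons, hdrop, List.zip_nil_right, List.foldl_nil]
      rw [if_neg (by exact_mod_cast hs), hcast, ih, hdrop1]
      simp


-- A's fill loop (rescan of values for each missing letter) equals the single zip of the
-- precomputed missing and leftover lists
theorem fill_eq_zip (L : List Char) (m : PySem.Dict Char Char) (hL : L.Nodup)
    (hlen : (L.filter (fun c => !(m.contains c))).length
            ≤ (asciiLower.filter (fun c => !(m.values.contains c))).length) :
    L.foldl
      (fun m c =>
        if m.contains c then m
        else
          match asciiLower.find? (fun p => !(m.values.contains p)) with
          | some p => m.insert c p
          | none => m) m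
    = ((L.filter (fun c => !(m.contains c))).zip
        (asciiLower.filter (fun c => !(m.values.contains c)))).foldl
        (fun m kv => m.insert kv.1 kv.2) m := by
  induction L generalizing m with
  | nil => simp
  | cons c L' ih =>
    rcases List.nodup_cons.mp hL with ⟨hcL', hL'⟩
    by_cases hc : m.contains c
    · simp only [List.foldl_cons, List.filter_cons, hc, Bool.not_true, if_pos] at hlen ⊢
      simp only [Bool.false_eq_true, if_false]
      exact ih m hL' hlen
    · have hcF : m.contains c = false := Bool.not_eq_true _ |>.mp hc
      simp only [List.foldl_cons, List.filter_cons, hcF, Bool.not_false, if_true] at hlen ⊢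
      set avail := asciiLower.filter (fun x => !(m.values.contains x)) with havail
      cases hav : avail with
      | nil => rw [hav] at hlen; simp at hlen
      | cons v rest =>
        have hfind : asciiLower.find? (fun p => !(m.values.contains p)) = some v := by
          rw [← List.head?_filter, ← havail, hav]; rfl
        rw [hfind]
        -- the new dict
        set m' := m.insert c v with hm'
        have hvals' : m'.values = m.values ++ [v] := by
          simp only [hm', PySem.Dict.values, PySem.Dict.items_insert_of_not_contains m v hcF,
            List.map_append, List.map_cons, List.map_nil]
        have hfiltL : L'.filter (fun x => !(m'.contains x)) = L'.filter (fun x => !(m.contains x)) := by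
          apply List.filter_congr
          intro x hx
          have hxc : x ≠ c := fun h => hcL' (h ▸ hx)
          simp [hm', PySem.Dict.contains_insert, hxc]
        have hnodupAvail : (v :: rest).Nodup := by
          rw [← hav, havail]; exact List.Nodup.filter _ (by decide)
        have hvrest : v ∉ rest := (List.nodup_cons.mp hnodupAvail).1
        have hfiltA : asciiLower.filter (fun x => !(m'.values.contains x)) = rest := by
          have h1 : ∀ x, (!((m.values ++ [v]).contains x)) = ((!(m.values.contains x)) && !(v == x)) := by
            intro x
            by_cases hxv : x = v
            · simp [hxv]
            · simp [hxv]
              exact fun _ => Ne.symm hxv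
          calc asciiLower.filter (fun x => !(m'.values.contains x))
              = asciiLower.filter (fun x => ((!(m.values.contains x)) && !(v == x))) := by
                rw [hvals']; exact List.filter_congr (fun x _ => h1 x)
            _ = (asciiLower.filter (fun x => !(m.values.contains x))).filter (fun x => !(v == x)) := by
                rw [List.filter_filter]
                exact List.filter_congr (fun x _ => by rw [Bool.and_comm])
            _ = (v :: rest).filter (fun x => !(v == x)) := by rw [← havail, hav]
            _ = rest := by
                simp only [List.filter_cons, BEq.rfl, Bool.not_true, Bool.false_eq_true, if_false]
                refine List.filter_eq_self.mpr (fun x hx => ?_)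
                have hne : v ≠ x := fun h => hvrest (h ▸ hx)
                simp [hne]
        rw [hav] at hlen
        have hlen' : (L'.filter (fun x => !(m'.contains x))).length
            ≤ (asciiLower.filter (fun x => !(m'.values.contains x))).length := by
          rw [hfiltL, hfiltA]
          simp only [List.length_cons] at hlen
          omega
        have hstep : (if (false = true) then m
            else match some v with | some p => m.insert c p | none => m) = m' := by
          simp [hm']
        rw [hstep, ih m' hL' hlen', hfiltL, hfiltA]
        simp only [List.zip_cons_cons, List.foldl_cons]
        rw [hm']


-- Set.contains over ofList agrees with plain list membership
theorem set_contains_ofList (vs : List Char) (x : Char) :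
    PySem.Set.contains (PySem.Set.ofList vs) x = vs.contains x := by
  apply Bool.coe_iff_coe.mp
  constructor
  · intro h
    exact List.contains_iff_mem.mpr ((PySem.Set.mem_ofList vs x).mp (List.contains_iff_mem.mp h))
  · intro h
    exact List.contains_iff_mem.mpr ((PySem.Set.mem_ofList vs x).mpr (List.contains_iff_mem.mp h))

-- given the distinct lowercase cipher letters L, the whole dict-building phase of A
-- (enumerate/guard loop + nested fill-in) equals B's zip-built dict + zipped fill-in
theorem dict_phase_eq (L : List Char) (hsub : ∀ x ∈ L, x ∈ asciiLower) (hnodup : L.Nodup) :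
    (asciiLower.foldl
      (fun m c =>
        if m.contains c then m
        else
          match asciiLower.find? (fun p => !(m.values.contains p)) with
          | some p => m.insert c p
          | none => m)
      ((PySem.List.enumerate L).foldl
        (fun m p => if p.1 < (englishFreqOrder.length : Int)
                    then m.insert p.2 (PySem.List.pyGetD englishFreqOrder p.1 'a')
                    else m)
        PySem.Dict.empty)).items.map (fun kv => (String.ofList [kv.1], String.ofList [kv.2]))
    = (((asciiLower.filter
          (fun c => !(((L.zip englishFreqOrder).foldl
            (fun (m : PySem.Dict Char Char) kv => m.insert kv.1 kv.2)
            PySem.Dict.empty).contains c))).zip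
        (asciiLower.filter
          (fun c => !(PySem.Set.contains (PySem.Set.ofList ((L.zip englishFreqOrder).foldl
            (fun (m : PySem.Dict Char Char) kv => m.insert kv.1 kv.2)
            PySem.Dict.empty).values) c)))).foldl
        (fun m kv => m.insert kv.1 kv.2)
        ((L.zip englishFreqOrder).foldl
          (fun (m : PySem.Dict Char Char) kv => m.insert kv.1 kv.2)
          PySem.Dict.empty)).items.map (fun kv => (String.ofList [kv.1], String.ofList [kv.2])) := by
  have hlen26 : L.length ≤ englishFreqOrder.length :=
    le_trans (List.subperm_of_subset hnodup hsub).length_le (by decide)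
  set M := (L.zip englishFreqOrder).foldl
    (fun (m : PySem.Dict Char Char) kv => m.insert kv.1 kv.2) PySem.Dict.empty with hM
  have hfresh : ∀ a ∈ L.zip englishFreqOrder,
      (PySem.Dict.empty : PySem.Dict Char Char).contains a.1 = false := by
    intro a _; exact PySem.Dict.contains_empty a.1
  have hknodup : ((L.zip englishFreqOrder).map Prod.fst).Nodup := by
    rw [List.map_fst_zip hlen26]; exact hnodup
  have hitems : M.items = L.zip englishFreqOrder := by
    rw [hM]
    have := PySem.Dict.items_foldl_insert_fresh (L.zip englishFreqOrder)
      Prod.fst Prod.snd PySem.Dict.empty hfresh hknodup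
    simpa using this
  have hkeys : M.keys = L := by
    show M.items.map (fun x => x.1) = L
    rw [hitems]
    exact List.map_fst_zip hlen26
  have hvlen : M.values.length ≤ L.length := by
    show (M.items.map (fun x => x.2)).length ≤ L.length
    rw [hitems]
    simp [List.length_zip]
  -- A's enumerate loop builds the same dict M
  have hAmap : (PySem.List.enumerate L).foldl
      (fun m p => if p.1 < (englishFreqOrder.length : Int)
                  then m.insert p.2 (PySem.List.pyGetD englishFreqOrder p.1 'a')
                  else m) PySem.Dict.empty = M := by
    have := enumerate_guard_eq_zip L 0 PySem.Dict.empty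
    simpa using this
  -- counting: at least as many unused plain letters as unmapped cipher letters
  have hcnt1 : (asciiLower.filter (fun c => M.contains c)).length = L.length := by
    have hperm : (asciiLower.filter (fun c => M.contains c)).Perm L := by
      rw [List.perm_ext_iff_of_nodup (List.Nodup.filter _ (by decide)) hnodup]
      intro a
      rw [List.mem_filter]
      constructor
      · rintro ⟨_, hca⟩
        rw [← hkeys]
        exact (PySem.Dict.contains_iff_mem_keys M a).mp hca
      · intro haL
        exact ⟨hsub a haL, (PySem.Dict.contains_iff_mem_keys M a).mpr (hkeys ▸ haL)⟩
    exact hperm.length_eq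
  have hcnt2 : (asciiLower.filter (fun c => M.values.contains c)).length ≤ L.length := by
    refine le_trans (List.Subperm.length_le ?_) hvlen
    refine List.subperm_of_subset (List.Nodup.filter _ (by decide)) ?_
    intro x hx
    exact List.contains_iff_mem.mp (List.mem_filter.mp hx).2
  have hfill_len : (asciiLower.filter (fun c => !(M.contains c))).length
      ≤ (asciiLower.filter (fun c => !(M.values.contains c))).length := by
    have h1 := List.length_eq_length_filter_add (l := asciiLower) (fun c => M.contains c)
    have h2 := List.length_eq_length_filter_add (l := asciiLower) (fun c => M.values.contains c)
    omega
  have hrem : asciiLower.filter (fun c => !(PySem.Set.contains (PySem.Set.ofList M.values) c))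
      = asciiLower.filter (fun c => !(M.values.contains c)) :=
    List.filter_congr (fun x _ => by rw [set_contains_ofList])
  rw [hAmap, fill_eq_zip asciiLower M (by decide) hfill_len, hrem]

-- ===== VERDICT (by name: the statement is the Claim_ definition above) =====

theorem solve_substitution_cipher_spec : Claim_equal_solve_substitution_cipher := by
  intro text _hdom
  unfold Spec_solve_substitution_cipher
  unfold solve_substitution_cipher solve_substitution_cipher_alt
  by_cases hsz : (PySem.Dict.counter (PySem.Str.lower text).toList).size < 10
  · simp only [hsz, if_true]
  · simp only [hsz, if_false]
    refine dict_phase_eq _ ?_ ?_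
    · -- every cipher letter is a lowercase ASCII letter
      intro x hx
      rcases List.mem_map.mp hx with ⟨p, hpf, rfl⟩
      rcases List.mem_filter.mp hpf with ⟨hps, hpa⟩
      have hpi : p ∈ (PySem.Dict.counter (PySem.Str.lower text).toList).items :=
        (PySem.List.mem_sorted _ _ _ _).mp hps
      rw [PySem.Dict.items_counter] at hpi
      rcases List.mem_map.mp hpi with ⟨k, hk, rfl⟩
      have hkxs : k ∈ (PySem.Str.lower text).toList := (PySem.Set.mem_ofList _ _).mp hk
      rw [PySem.Str.toList_lower] at hkxs
      rcases List.mem_map.mp hkxs with ⟨d, _, rfl⟩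
      exact lowerChar_mem_asciiLower d hpa
    · -- cipher letters are pairwise distinct
      have h1 : (((PySem.List.sorted (PySem.Dict.counter (PySem.Str.lower text).toList).items
          (fun p => p.2) true)).map (fun p => p.1)).Nodup := by
        have hperm := (PySem.List.sorted_perm
          (PySem.Dict.counter (PySem.Str.lower text).toList).items
          (fun p : Char × Int => p.2) true).map (fun p : Char × Int => p.1)
        have hk := PySem.Dict.nodup_keys_counter (PySem.Str.lower text).toList
        simp only [PySem.Dict.keys] at hk
        exact hperm.nodup_iff.mpr hk
      have hsg : ((PySem.List.sorted (PySem.Dict.counter (PySem.Str.lower text).toList).items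
            (fun p => p.2) true).filter (fun p => PySem.Chars.isalpha p.1)).Sublist
          (PySem.List.sorted (PySem.Dict.counter (PySem.Str.lower text).toList).items
            (fun p => p.2) true) := List.filter_sublist
      exact List.Nodup.sublist (hsg.map (fun p : Char × Int => p.1)) h1
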